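-- pv_equiv track=rewrite | github.com/zckr08/Proyecto-0-Codificaci-n | cifradocesar Zack.py | codificarProblema3
-- ===== SOURCE A (Python) =====
-- def codificarProblema3(texto, palabra):
--     alfabeto = list("abcdefghijklmnñopqrstuvwxyz")
--     palabra = palabra.lower()
--     texto = texto.lower()
--     textoCodificado = ""
--     contador = 0
--     for i in texto:
--             if i not in alfabeto:
--                 textoCodificado = textoCodificado+i
--             else:
--                 posicion = (alfabeto.index(i)+(alfabeto.index((palabra[(contador%len(palabra))]))))%27
--                 textoCodificado = textoCodificado+alfabeto[posicion]
--                 contador += 1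
--     return textoCodificado
-- ===== SOURCE B (Python) =====
-- def codificarProblema3(texto, palabra):
--     alfabeto = list("abcdefghijklmn\u00f1opqrstuvwxyz")
--     palabra = palabra.lower()
--     texto = texto.lower()
--     letters = [c for c in texto if c in alfabeto]
--     encoded = [alfabeto[(alfabeto.index(c) + alfabeto.index(palabra[k % len(palabra)])) % 27]
--                for k, c in enumerate(letters)]
--     it = iter(encoded)
--     return "".join(next(it) if c in alfabeto else c for c in texto)
-- ===== Notes on version B (the rewrite author's own statement) =====
-- stated objective: alternative
-- what changed: A builds the result in one stateful loop (string concatenation plus a letter counter); B extracts the letter subsequence, encodes it in a single comprehension over enumerate, and merges the encoded letters back into the text with an iterator.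
import Mathlib
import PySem

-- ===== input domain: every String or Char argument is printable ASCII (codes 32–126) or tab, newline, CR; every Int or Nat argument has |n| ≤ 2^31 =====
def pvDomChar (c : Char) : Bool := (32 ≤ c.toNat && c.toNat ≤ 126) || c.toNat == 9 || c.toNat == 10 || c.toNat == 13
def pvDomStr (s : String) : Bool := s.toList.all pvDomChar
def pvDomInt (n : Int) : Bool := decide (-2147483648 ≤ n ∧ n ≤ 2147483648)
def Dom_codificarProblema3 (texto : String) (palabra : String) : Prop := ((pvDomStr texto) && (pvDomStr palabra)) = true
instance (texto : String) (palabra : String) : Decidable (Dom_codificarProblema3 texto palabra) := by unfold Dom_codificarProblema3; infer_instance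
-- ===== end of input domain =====

-- B: instead of A's single stateful loop (string concatenation + a letter counter), B extracts the
-- letter subsequence, encodes it in one comprehension over enumerate, and merges the encoded letters
-- back into the text; equal cost, different decomposition (objective: alternative).

-- ===== PORT A =====
-- the body of A's for-loop, state = (textoCodificado, contador); `.getD` defaults are only reached where Python raises
def cpStepA (alfabeto p : List Char) (st : List Char × Nat) (i : Char) : List Char × Nat :=
  if ¬ (i ∈ alfabeto) then (st.1 ++ [i], st.2)
  else
    let posicion := (((PySem.List.index? alfabeto i).getD 0) +
      ((PySem.List.index? alfabeto
        ((PySem.List.pyGet? p ((st.2 % p.length : Nat) : Int)).getD ' ')).getD 0)) % 27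
    (st.1 ++ [(PySem.List.pyGet? alfabeto ((posicion : Nat) : Int)).getD ' '], st.2 + 1)

def codificarProblema3 (texto : String) (palabra : String) : String :=
  let alfabeto : List Char := "abcdefghijklmnñopqrstuvwxyz".toList
  let p := PySem.Chars.lower palabra.toList
  let t := PySem.Chars.lower texto.toList
  let st := t.foldl (cpStepA alfabeto p) ([], 0)
  String.ofList st.1

-- ===== PORT B =====
-- `"".join(next(it) if c in alfabeto else c for c in texto)`: walk t, consuming encoded letters
def cpMerge (alfabeto : List Char) : List Char → List Char → List Char
  | [], _ => []
  | c :: cs, es =>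
    if c ∈ alfabeto then
      match es with
      | e :: es' => e :: cpMerge alfabeto cs es'
      | [] => []          -- unreachable: the iterator always holds one letter per alphabet char
    else c :: cpMerge alfabeto cs es

def codificarProblema3_alt (texto : String) (palabra : String) : String :=
  let alfabeto : List Char := "abcdefghijklmnñopqrstuvwxyz".toList
  let p := PySem.Chars.lower palabra.toList
  let t := PySem.Chars.lower texto.toList
  let letters := t.filter (fun c => c ∈ alfabeto)
  let encoded := (PySem.List.enumerate letters 0).map (fun kc =>
    (PySem.List.pyGet? alfabeto
      ((((((PySem.List.index? alfabeto kc.2).getD 0) +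
        ((PySem.List.index? alfabeto
          ((PySem.List.pyGet? p ((kc.1.toNat % p.length : Nat) : Int)).getD ' ')).getD 0)) % 27 : Nat)
        : Int))).getD ' ')
  String.ofList (cpMerge alfabeto t encoded)

-- ===== PRECONDITION & SPEC =====
-- Pre_ excludes exactly the inputs where Python A raises: ZeroDivisionError (empty palabra while texto
-- contains an alphabet letter) and ValueError (a palabra position that is actually used — position j is
-- used iff j < min(#letters, len(palabra)) — holds a non-alphabet character). B raises there too.
def Pre_codificarProblema3 (texto : String) (palabra : String) : Prop :=
  let alfabeto : List Char := "abcdefghijklmnñopqrstuvwxyz".toList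
  let p := PySem.Chars.lower palabra.toList
  let L := (PySem.Chars.lower texto.toList).countP (fun c => c ∈ alfabeto)
  (0 < L → p ≠ []) ∧ ∀ j < min L p.length, p.getD j ' ' ∈ alfabeto
instance (texto : String) (palabra : String) : Decidable (Pre_codificarProblema3 texto palabra) := by
  unfold Pre_codificarProblema3; infer_instance

def pvWitness_codificarProblema3 : String × String := ("Hola, mundo!", "Sol")

def Spec_codificarProblema3 (texto : String) (palabra : String) (out : String) : Prop := out = codificarProblema3_alt texto palabra
instance (texto : String) (palabra : String) (out : String) : Decidable (Spec_codificarProblema3 texto palabra out) := by unfold Spec_codificarProblema3; infer_instance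

-- ===== CLAIM (what is proved, stated in full; the proofs are below) =====
def Claim_equal_codificarProblema3 : Prop := ∀ (texto : String) (palabra : String), Dom_codificarProblema3 texto palabra → Pre_codificarProblema3 texto palabra → Spec_codificarProblema3 texto palabra (codificarProblema3 texto palabra)

-- ===== LEMMAS AND PROOFS =====

-- the encoding of one letter c at letter-position k (the identical arithmetic of both ports)
def cpE (alfabeto p : List Char) (k : Nat) (c : Char) : Char :=
  (PySem.List.pyGet? alfabeto
    (((((PySem.List.index? alfabeto c).getD 0) +
      ((PySem.List.index? alfabeto
        ((PySem.List.pyGet? p ((k % p.length : Nat) : Int)).getD ' ')).getD 0)) % 27 : Nat) : Int)).getD ' '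

-- the encoded letters of ls, positions counted from k
def cpEncFrom (alfabeto p : List Char) (k : Nat) : List Char → List Char
  | [] => []
  | c :: cs => cpE alfabeto p k c :: cpEncFrom alfabeto p (k + 1) cs

lemma enumerate_map_eq_encFrom (alfabeto p : List Char) :
    ∀ (ls : List Char) (k : Nat),
      (PySem.List.enumerate ls (k : Int)).map (fun kc =>
        (PySem.List.pyGet? alfabeto
          ((((((PySem.List.index? alfabeto kc.2).getD 0) +
            ((PySem.List.index? alfabeto
              ((PySem.List.pyGet? p ((kc.1.toNat % p.length : Nat) : Int)).getD ' ')).getD 0)) % 27 : Nat)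
            : Int))).getD ' ')
      = cpEncFrom alfabeto p k ls := by
  intro ls
  induction ls with
  | nil => intro k; simp [PySem.List.enumerate_nil, cpEncFrom]
  | cons c cs ih =>
    intro k
    rw [PySem.List.enumerate_cons]
    have h1 : ((k : Int) + 1) = ((k + 1 : Nat) : Int) := by push_cast; ring
    rw [List.map_cons, h1, ih (k + 1)]
    simp only [cpEncFrom, cpE, Int.toNat_natCast]

lemma loopA_eq (alfabeto p : List Char) :
    ∀ (cs acc : List Char) (k : Nat),
      cs.foldl (cpStepA alfabeto p) (acc, k)
      = (acc ++ cpMerge alfabeto cs (cpEncFrom alfabeto p k (cs.filter (fun c => c ∈ alfabeto))),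
         k + cs.countP (fun c => c ∈ alfabeto)) := by
  intro cs
  induction cs with
  | nil => intro acc k; simp [cpMerge]
  | cons c cs ih =>
    intro acc k
    by_cases hc : c ∈ alfabeto
    · have hstep : cpStepA alfabeto p (acc, k) c = (acc ++ [cpE alfabeto p k c], k + 1) := by
        simp [cpStepA, cpE, hc]
      rw [List.foldl_cons, hstep, ih]
      have hf : (c :: cs).filter (fun c => c ∈ alfabeto)
          = c :: cs.filter (fun c => c ∈ alfabeto) := by
        simp [hc]
      rw [hf]
      simp only [cpEncFrom, cpMerge, if_pos hc, List.countP_cons, decide_eq_true hc]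
      refine Prod.ext ?_ ?_
      · simp
      · simp; omega
    · have hstep : cpStepA alfabeto p (acc, k) c = (acc ++ [c], k) := by
        simp [cpStepA, hc]
      rw [List.foldl_cons, hstep, ih]
      have hf : (c :: cs).filter (fun c => c ∈ alfabeto)
          = cs.filter (fun c => c ∈ alfabeto) := by
        simp [hc]
      rw [hf]
      simp only [cpMerge, if_neg hc, List.countP_cons, decide_eq_false hc]
      refine Prod.ext ?_ ?_
      · simp
      · simp

-- ===== VERDICT (by name: the statement is the Claim_ definition above) =====
theorem codificarProblema3_spec : Claim_equal_codificarProblema3 := by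
  intro texto palabra _ _
  unfold Spec_codificarProblema3 codificarProblema3 codificarProblema3_alt
  have h0 := enumerate_map_eq_encFrom ("abcdefghijklmnñopqrstuvwxyz".toList)
    (PySem.Chars.lower palabra.toList)
    ((PySem.Chars.lower texto.toList).filter
      (fun c => c ∈ "abcdefghijklmnñopqrstuvwxyz".toList)) 0
  rw [Nat.cast_zero] at h0
  simp only [loopA_eq, List.nil_append, h0]
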